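-- pv_equiv track=rewrite | github.com/Pleistone/404CTF_2023 | Cryptographie/La_reponse_de_voris/solve.py | gen_ligne
-- ===== SOURCE A (Python) =====
-- def gen_ligne(i,n):
--     ligne = []
--     for k in range(n):
--         if k<i:
--             ligne.append(k+1)
--         else:
--             ligne.append(i+1)
--     return ligne
-- ===== SOURCE B (Python) =====
-- def gen_ligne(i, n):
--     m = max(0, min(i, n))
--     return list(range(1, m + 1)) + [i + 1] * (max(0, n) - m)
-- ===== Notes on version B (the rewrite author's own statement) =====
-- stated objective: simpler
-- what changed: Replaces the element-by-element loop with an if/else branch by building the whole result from two slices: the ascending run range(1, m+1) with m = max(0, min(i, n)), concatenated with a constant tail [i+1] repeated (max(0,n)-m) times.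
import Mathlib
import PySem

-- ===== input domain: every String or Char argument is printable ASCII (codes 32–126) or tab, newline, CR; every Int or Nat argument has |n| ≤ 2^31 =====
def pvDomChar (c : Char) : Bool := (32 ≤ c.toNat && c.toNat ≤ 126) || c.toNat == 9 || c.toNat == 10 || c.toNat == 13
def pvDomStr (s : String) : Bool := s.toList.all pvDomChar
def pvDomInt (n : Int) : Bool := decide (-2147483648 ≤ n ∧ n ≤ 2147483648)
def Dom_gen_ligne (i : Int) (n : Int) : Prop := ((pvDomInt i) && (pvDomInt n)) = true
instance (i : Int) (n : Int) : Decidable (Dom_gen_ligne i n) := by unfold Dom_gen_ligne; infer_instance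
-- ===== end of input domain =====

-- B builds the result as two whole segments (ascending run ++ constant tail) instead of A's per-element loop; objective: simpler.
-- ===== PORT A =====
def gen_ligne (i : Int) (n : Int) : List Int :=
  (PySem.List.pyRange 0 n 1).foldl
    (fun ligne k => if k < i then ligne ++ [k + 1] else ligne ++ [i + 1]) []

-- ===== PORT B =====
def gen_ligne_alt (i : Int) (n : Int) : List Int :=
  PySem.List.pyRange 1 (max 0 (min i n) + 1) 1
    ++ List.replicate (max 0 n - max 0 (min i n)).toNat (i + 1)

-- ===== PRECONDITION & SPEC =====
def Spec_gen_ligne (i : Int) (n : Int) (out : List Int) : Prop := out = gen_ligne_alt i n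
instance (i : Int) (n : Int) (out : List Int) : Decidable (Spec_gen_ligne i n out) := by unfold Spec_gen_ligne; infer_instance

-- ===== CLAIM (what is proved, stated in full; the proofs are below) =====
def Claim_equal_gen_ligne : Prop := ∀ (i : Int) (n : Int), Dom_gen_ligne i n → Spec_gen_ligne i n (gen_ligne i n)

-- ===== LEMMAS AND PROOFS =====

-- ===== VERDICT (by name: the statement is the Claim_ definition above) =====
lemma gen_ligne_nat (i : Int) (N : Nat) :
    gen_ligne i (N : Int) = gen_ligne_alt i (N : Int) := by
  induction N with
  | zero =>
    have h0 : max 0 (min i (0:Int)) = 0 := by omega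
    simp [gen_ligne, gen_ligne_alt,
      PySem.List.pyRange_one_eq_nil (le_refl (1:Int))]
  | succ N ih =>
    unfold gen_ligne at *
    push_cast
    rw [PySem.List.pyRange_one_succ_right (by positivity), List.foldl_append, ih]
    unfold gen_ligne_alt
    simp only [List.foldl_cons, List.foldl_nil]
    by_cases h : (N : Int) < i
    · simp only [if_pos h]
      have h1 : max 0 (min i (N:Int)) = (N:Int) := by omega
      have h2 : max 0 (min i ((N:Int)+1)) = (N:Int)+1 := by omega
      rw [h1, h2, PySem.List.pyRange_one_succ_right (show (1:Int) ≤ (N:Int)+1 by omega)]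
      simp [show (max 0 ((N:Int)+1) - ((N:Int)+1)).toNat = 0 from by omega]
    · simp only [if_neg h]
      have h1 : max 0 (min i ((N:Int)+1)) = max 0 (min i (N:Int)) := by omega
      have h2 : (max 0 ((N:Int)+1) - max 0 (min i (N:Int))).toNat
          = (max 0 (N:Int) - max 0 (min i (N:Int))).toNat + 1 := by omega
      rw [h1, h2, List.replicate_succ', ← List.append_assoc]

theorem gen_ligne_spec : Claim_equal_gen_ligne := by
  intro i n _
  unfold Spec_gen_ligne
  rcases le_or_gt 0 n with hn | hn
  · obtain ⟨N, rfl⟩ : ∃ N : Nat, n = (N : Int) := ⟨n.toNat, by omega⟩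
    exact gen_ligne_nat i N
  · have h0 : max 0 (min i n) = 0 := by omega
    have h1 : (max 0 n - max 0 (min i n)).toNat = 0 := by omega
    have e1 : PySem.List.pyRange 0 n 1 = [] := PySem.List.pyRange_one_eq_nil (by omega)
    have e2 : PySem.List.pyRange 1 (max 0 (min i n) + 1) 1 = [] := by
      rw [h0]; exact PySem.List.pyRange_one_eq_nil (by omega)
    simp [gen_ligne, gen_ligne_alt, e1, e2, h1]
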